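-- pv_equiv track=rewrite | github.com/Saaannnn/algyprog | main.py | recorrido_espiral
-- ===== SOURCE A (Python) =====
-- def recorrido_espiral(filas, columnas):
--     """Genera coordenadas para un recorrido en espiral."""
--     ruta = []
--     f_inicio, f_fin = 0, filas - 1
--     c_inicio, c_fin = 0, columnas - 1
--
--     while f_inicio <= f_fin and c_inicio <= c_fin:
--         # Recorrer a la derecha
--         for c in range(c_inicio, c_fin + 1):
--             ruta.append((f_inicio, c))
--         f_inicio += 1
--
--         # Recorrer hacia abajo
--         for f in range(f_inicio, f_fin + 1):
--             ruta.append((f, c_fin))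
--         c_fin -= 1
--
--         # Recorrer a la izquierda
--         if f_inicio <= f_fin:
--             for c in range(c_fin, c_inicio - 1, -1):
--                 ruta.append((f_fin, c))
--             f_fin -= 1
--
--         # Recorrer hacia arriba
--         if c_inicio <= c_fin:
--             for f in range(f_fin, f_inicio - 1, -1):
--                 ruta.append((f, c_inicio))
--             c_inicio += 1
--     return ruta
-- ===== SOURCE B (Python) =====
-- def recorrido_espiral(filas, columnas):
--     """Genera coordenadas para un recorrido en espiral.
--
--     Pela la fila superior y gira: emite la primera fila del sub-rectangulo
--     actual bajo una transformacion afin, compone la transformacion con un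
--     cuarto de giro y sigue con las dimensiones intercambiadas.
--     """
--     ruta = []
--     m, n = filas, columnas
--     # transformacion actual: T(r, c) = (p + a*r + b*c, q + e*r + d*c)
--     p, q, a, b, e, d = 0, 0, 1, 0, 0, 1
--     while m > 0 and n > 0:
--         ruta += [(p + b * j, q + d * j) for j in range(n)]
--         # T' = T o rho con rho(r, c) = (c + 1, n - 1 - r)
--         p, q, a, b, e, d = p + a + b * (n - 1), q + e + d * (n - 1), -b, a, -d, e
--         m, n = n, m - 1
--     return ruta
-- ===== Notes on version B (the rewrite author's own statement) =====
-- stated objective: alternative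
-- what changed: Replaces A's four-sided boundary loop with shrinking f/c bounds by a peel-and-rotate scheme: each iteration emits only the top row of the current sub-grid through a maintained affine transform, then composes the transform with a quarter turn and swaps the dimensions.
import Mathlib
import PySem

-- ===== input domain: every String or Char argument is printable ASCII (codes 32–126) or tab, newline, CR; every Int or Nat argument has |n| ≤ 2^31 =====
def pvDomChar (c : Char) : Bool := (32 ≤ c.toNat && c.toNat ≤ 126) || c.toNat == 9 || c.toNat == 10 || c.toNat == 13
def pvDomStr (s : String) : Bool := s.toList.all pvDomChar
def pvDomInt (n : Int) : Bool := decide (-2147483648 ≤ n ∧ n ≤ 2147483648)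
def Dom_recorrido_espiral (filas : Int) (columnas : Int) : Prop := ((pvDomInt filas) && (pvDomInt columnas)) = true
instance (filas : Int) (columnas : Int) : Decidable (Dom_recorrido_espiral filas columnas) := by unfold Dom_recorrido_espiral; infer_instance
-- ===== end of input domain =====

-- B replaces A's four-sided boundary bookkeeping by peeling the top row under an
-- iteratively composed affine quarter-turn transform; same cost, different algorithm.

-- ===== PORT A =====
-- A's while loop over the four shrinking boundaries, state (f_inicio, f_fin, c_inicio, c_fin).
-- The Nat fuel only makes the recursion structural: it is at least the loop's
-- iteration count, so the guard always fails before the fuel runs out.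
def pvALoop (fuel : Nat) (f0 f1 c0 c1 : Int) : List (Int × Int) :=
  match fuel with
  | 0 => []
  | fuel + 1 =>
    if f0 ≤ f1 ∧ c0 ≤ c1 then
      let f0' := f0 + 1
      let c1' := c1 - 1
      let f1' := if f0' ≤ f1 then f1 - 1 else f1
      let c0' := if c0 ≤ c1' then c0 + 1 else c0
      ((PySem.List.pyRange c0 (c1 + 1) 1).map (fun c => (f0, c)))
        ++ ((PySem.List.pyRange f0' (f1 + 1) 1).map (fun f => (f, c1)))
        ++ (if f0' ≤ f1 then (PySem.List.pyRange c1' (c0 - 1) (-1)).map (fun c => (f1, c)) else [])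
        ++ (if c0 ≤ c1' then (PySem.List.pyRange f1' (f0' - 1) (-1)).map (fun f => (f, c0)) else [])
        ++ pvALoop fuel f0' f1' c0' c1'
    else []

def recorrido_espiral (filas : Int) (columnas : Int) : List (Int × Int) :=
  pvALoop (filas + columnas).toNat 0 (filas - 1) 0 (columnas - 1)

-- ===== PORT B =====
-- B's while loop: current sub-grid m×n, affine transform T(r,c) = (p+a*r+b*c, q+e*r+d*c).
-- Nat fuel again only bounds the iteration count (m+n drops by 1 per turn).
def pvBLoop (fuel : Nat) (m n p q a b e d : Int) : List (Int × Int) :=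
  match fuel with
  | 0 => []
  | fuel + 1 =>
    if 0 < m ∧ 0 < n then
      ((PySem.List.pyRange 0 n 1).map (fun j => (p + b * j, q + d * j)))
        ++ pvBLoop fuel n (m - 1) (p + a + b * (n - 1)) (q + e + d * (n - 1)) (-b) a (-d) e
    else []

def recorrido_espiral_alt (filas : Int) (columnas : Int) : List (Int × Int) :=
  pvBLoop (filas + columnas).toNat filas columnas 0 0 1 0 0 1

-- ===== PRECONDITION & SPEC =====
def Spec_recorrido_espiral (filas : Int) (columnas : Int) (out : List (Int × Int)) : Prop := out = recorrido_espiral_alt filas columnas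
instance (filas : Int) (columnas : Int) (out : List (Int × Int)) : Decidable (Spec_recorrido_espiral filas columnas out) := by unfold Spec_recorrido_espiral; infer_instance

-- ===== CLAIM (what is proved, stated in full; the proofs are below) =====
def Claim_equal_recorrido_espiral : Prop := ∀ (filas : Int) (columnas : Int), Dom_recorrido_espiral filas columnas → Spec_recorrido_espiral filas columnas (recorrido_espiral filas columnas)

-- ===== LEMMAS AND PROOFS =====

lemma map_natrange_ext (K K' : Nat) (f g : Nat → Int × Int) (h : K = K')
    (hfg : ∀ k, k < K → f k = g k) : (List.range K).map f = (List.range K').map g := by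
  subst h
  apply List.map_congr_left
  intro k hk
  exact hfg k (List.mem_range.mp hk)

lemma pvALoop_nil (fuel : Nat) {f0 f1 c0 c1 : Int} (h : f1 < f0 ∨ c1 < c0) :
    pvALoop fuel f0 f1 c0 c1 = [] := by
  cases fuel with
  | zero => rfl
  | succ fuel => rw [pvALoop, if_neg (by omega)]

lemma pvALoop_unfold (fuel : Nat) (f0 f1 c0 c1 : Int) (h : f0 ≤ f1 ∧ c0 ≤ c1) :
    pvALoop (fuel + 1) f0 f1 c0 c1 =
      ((PySem.List.pyRange c0 (c1 + 1) 1).map (fun c => (f0, c)))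
        ++ ((PySem.List.pyRange (f0 + 1) (f1 + 1) 1).map (fun f => (f, c1)))
        ++ (if f0 + 1 ≤ f1 then (PySem.List.pyRange (c1 - 1) (c0 - 1) (-1)).map (fun c => (f1, c)) else [])
        ++ (if c0 ≤ c1 - 1 then
              (PySem.List.pyRange (if f0 + 1 ≤ f1 then f1 - 1 else f1) (f0 + 1 - 1) (-1)).map (fun f => (f, c0))
            else [])
        ++ pvALoop fuel (f0 + 1) (if f0 + 1 ≤ f1 then f1 - 1 else f1) (if c0 ≤ c1 - 1 then c0 + 1 else c0) (c1 - 1) := by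
  rw [pvALoop, if_pos h]

-- Common spec: peel the top row, rotate the rest a quarter turn.
def pvSpiral (m n : Int) : List (Int × Int) :=
  if 0 < m ∧ 0 < n then
    ((PySem.List.pyRange 0 n 1).map (fun c => ((0 : Int), c)))
      ++ (pvSpiral n (m - 1)).map (fun rc => (rc.2 + 1, n - 1 - rc.1))
  else []
termination_by (m + n).toNat
decreasing_by omega

lemma pvSpiral_unfold (m n : Int) (hm : 1 ≤ m) :
    pvSpiral m n =
      ((PySem.List.pyRange 0 n 1).map (fun c => ((0 : Int), c)))
        ++ (pvSpiral n (m - 1)).map (fun rc => (rc.2 + 1, n - 1 - rc.1)) := by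
  by_cases hn : 0 < n
  · rw [pvSpiral, if_pos ⟨by omega, hn⟩]
  · rw [pvSpiral, if_neg (by omega), pvSpiral, if_neg (by omega),
      PySem.List.pyRange_one_eq_nil (by omega)]
    simp

lemma pvSpiral_one_left (n : Int) :
    pvSpiral 1 n = (PySem.List.pyRange 0 n 1).map (fun c => ((0 : Int), c)) := by
  rw [pvSpiral_unfold 1 n (by omega), pvSpiral, if_neg (by omega)]
  simp

lemma pvSpiral_one_right (m : Int) :
    pvSpiral m 1 = (PySem.List.pyRange 0 m 1).map (fun r => (r, (0 : Int))) := by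
  by_cases hm : 0 < m
  · rw [pvSpiral_unfold m 1 (by omega), pvSpiral_one_left, PySem.List.pyRange_one,
      PySem.List.pyRange_one, PySem.List.pyRange_one]
    simp only [List.map_map]
    have h1 : ((1 : Int) - 0).toNat = 1 := by decide
    rw [h1, show (List.range 1) = [0] from rfl]
    have h2 : (m - 0).toNat = (m - 1 - 0).toNat + 1 := by omega
    rw [h2, List.range_succ_eq_map]
    simp [Function.comp_def]
  · rw [pvSpiral, if_neg (by omega), PySem.List.pyRange_one_eq_nil (by omega)]
    simp

-- One full ring of the peel-and-rotate spec (m, n ≥ 2).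
lemma pvSpiral_ring (m n : Int) (hm : 2 ≤ m) (hn : 2 ≤ n) :
    pvSpiral m n =
      ((PySem.List.pyRange 0 n 1).map (fun c => ((0 : Int), c)))
        ++ ((PySem.List.pyRange 0 (m - 1) 1).map (fun k => (k + 1, n - 1)))
        ++ ((PySem.List.pyRange 0 (n - 1) 1).map (fun k => (m - 1, n - 2 - k)))
        ++ ((PySem.List.pyRange 0 (m - 2) 1).map (fun k => (m - 2 - k, (0 : Int))))
        ++ (pvSpiral (m - 2) (n - 2)).map (fun rc => (rc.1 + 1, rc.2 + 1)) := by
  have e1 : m - 1 - 1 = m - 2 := by ring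
  have e2 : n - 1 - 1 = n - 2 := by ring
  rw [pvSpiral_unfold m n (by omega), pvSpiral_unfold n (m - 1) (by omega),
      pvSpiral_unfold (m - 1) (n - 1) (by omega), pvSpiral_unfold (n - 1) (m - 1 - 1) (by omega)]
  simp only [List.map_append, List.map_map, List.append_assoc, e1, e2]
  congr 1
  congr 1
  · apply List.map_congr_left; intro c _; simp
  congr 1
  · apply List.map_congr_left; intro c _; simp [Function.comp_def]; constructor <;> ring
  congr 1
  · apply List.map_congr_left; intro c _; simp [Function.comp_def]; constructor <;> ring
  · apply List.map_congr_left; intro rc _; obtain ⟨r, c⟩ := rc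
    simp [Function.comp_def]; constructor <;> ring

-- B's loop is the spec mapped through the carried affine transform.
lemma pvBLoop_eq (N : Nat) : ∀ (m n p q a b e d : Int), (m + n).toNat ≤ N →
    pvBLoop N m n p q a b e d =
      (pvSpiral m n).map (fun rc => (p + a * rc.1 + b * rc.2, q + e * rc.1 + d * rc.2)) := by
  induction N with
  | zero =>
    intro m n p q a b e d h
    rw [pvBLoop, pvSpiral, if_neg (by omega)]
    simp
  | succ N ih =>
    intro m n p q a b e d h
    rw [pvBLoop, pvSpiral]
    split_ifs with hg
    · rw [List.map_append, List.map_map,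
        ih n (m - 1) (p + a + b * (n - 1)) (q + e + d * (n - 1)) (-b) a (-d) e (by omega),
        List.map_map]
      congr 1
      · apply List.map_congr_left
        intro c _
        simp
      · apply List.map_congr_left
        intro rc _
        obtain ⟨r, c⟩ := rc
        simp
        constructor <;> ring
    · rfl

-- A's loop on the sub-rectangle [f0, f0+m-1] × [c0, c0+n-1] is the shifted spec.
lemma pvALoop_eq (N : Nat) : ∀ (m n f0 c0 : Int), (m + n).toNat ≤ N →
    pvALoop N f0 (f0 + m - 1) c0 (c0 + n - 1) =
      (pvSpiral m n).map (fun rc => (rc.1 + f0, rc.2 + c0)) := by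
  induction N with
  | zero =>
    intro m n f0 c0 h
    rw [pvSpiral, if_neg (by omega)]
    rfl
  | succ N ih =>
    intro m n f0 c0 h
    by_cases hg : 1 ≤ m ∧ 1 ≤ n
    · obtain ⟨hm, hn⟩ := hg
      by_cases hm1 : m = 1
      · subst hm1
        have e : f0 + 1 - 1 = f0 := by ring
        rw [e, pvALoop_unfold N f0 f0 c0 (c0 + n - 1) ⟨le_refl _, by omega⟩]
        simp only [if_neg (show ¬ f0 + 1 ≤ f0 by omega)]
        rw [PySem.List.pyRange_one_eq_nil (le_refl (f0 + 1)),
          PySem.List.pyRange_neg_one_eq_nil (show (f0 : Int) ≤ f0 + 1 - 1 by omega),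
          pvALoop_nil N (Or.inl (by omega)), pvSpiral_one_left]
        simp only [List.map_nil, ite_self, List.append_nil]
        simp only [PySem.List.pyRange_one, List.map_map]
        apply map_natrange_ext
        · omega
        · intro k hk
          simp
          omega
      · by_cases hn1 : n = 1
        · subst hn1
          have e : c0 + 1 - 1 = c0 := by ring
          rw [e, pvALoop_unfold N f0 (f0 + m - 1) c0 c0 ⟨by omega, le_refl _⟩]
          simp only [if_pos (show f0 + 1 ≤ f0 + m - 1 by omega),
            if_neg (show ¬ c0 ≤ c0 - 1 by omega)]
          rw [PySem.List.pyRange_neg_one_eq_nil (le_refl (c0 - 1)),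
            pvALoop_nil N (Or.inr (by omega)), pvSpiral_one_right,
            show PySem.List.pyRange 0 m 1 = PySem.List.pyRange 0 1 1 ++ PySem.List.pyRange 1 m 1
              from PySem.List.pyRange_one_append 0 1 m (by omega) (by omega)]
          simp only [List.map_nil, List.append_nil, List.map_append]
          congr 1
          · simp only [PySem.List.pyRange_one, List.map_map]
            apply map_natrange_ext
            · omega
            · intro k hk
              simp
              omega
          · simp only [PySem.List.pyRange_one, List.map_map]
            apply map_natrange_ext
            · omega
            · intro k hk
              simp
              omega
        · rw [pvALoop_unfold N f0 (f0 + m - 1) c0 (c0 + n - 1) ⟨by omega, by omega⟩]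
          simp only [if_pos (show f0 + 1 ≤ f0 + m - 1 by omega),
            if_pos (show c0 ≤ c0 + n - 1 - 1 by omega)]
          rw [show f0 + m - 1 - 1 = f0 + 1 + (m - 2) - 1 by ring,
            show c0 + n - 1 - 1 = c0 + 1 + (n - 2) - 1 by ring,
            ih (m - 2) (n - 2) (f0 + 1) (c0 + 1) (by omega),
            pvSpiral_ring m n (by omega) (by omega)]
          simp only [List.map_append, List.map_map, List.append_assoc]
          congr 1
          · simp only [PySem.List.pyRange_one, List.map_map]
            apply map_natrange_ext
            · omega
            · intro k hk
              simp
              omega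
          congr 1
          · simp only [PySem.List.pyRange_one, List.map_map]
            apply map_natrange_ext
            · omega
            · intro k hk
              simp
              omega
          congr 1
          · simp only [PySem.List.pyRange_one, PySem.List.pyRange_neg_one, List.map_map]
            apply map_natrange_ext
            · omega
            · intro k hk
              simp
              omega
          congr 1
          · simp only [PySem.List.pyRange_one, PySem.List.pyRange_neg_one, List.map_map]
            apply map_natrange_ext
            · omega
            · intro k hk
              simp
              omega
          · apply List.map_congr_left
            intro rc _
            obtain ⟨r, c⟩ := rc
            simp
            omega
    · rw [pvALoop_nil (N + 1) (by omega), pvSpiral, if_neg (by omega)]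
      simp

-- ===== VERDICT (by name: the statement is the Claim_ definition above) =====
theorem recorrido_espiral_spec : Claim_equal_recorrido_espiral := by
  intro filas columnas _
  unfold Spec_recorrido_espiral recorrido_espiral recorrido_espiral_alt
  have hA := pvALoop_eq (filas + columnas).toNat filas columnas 0 0 (le_refl _)
  have hB := pvBLoop_eq (filas + columnas).toNat filas columnas 0 0 1 0 0 1 (le_refl _)
  simp only [zero_add, add_zero, one_mul, zero_mul] at hA hB
  rw [hA, hB]
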